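-- pv_equiv track=rewrite | github.com/Arsen1302/Code-copy-detector | TestData/solutions/problem_197_5_1.py | solution_197_5_1
-- ===== SOURCE A (Python) =====
-- from typing import List
--
-- def solution_197_5_1(n: int) -> List[int]:
--
--     def solution_197_5_2(x):
--         """Pre-order traverse the tree."""
--         if x <= n:
--             ans.append(x)
--             for xx in range(10): solution_197_5_2(10*x + xx)
--
--     ans = []
--     for x in range(1, 10): solution_197_5_2(x)
--     return ans
-- ===== SOURCE B (Python) =====
-- from typing import List
--
-- def solution_197_5_1(n: int) -> List[int]:
--     # Iterative generator of lexicographic successors: keep only the current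
--     # number and advance it n times instead of a recursive DFS over the tree.
--     ans = []
--     curr = 1
--     for _ in range(n):
--         ans.append(curr)
--         if curr * 10 <= n:
--             curr *= 10
--         else:
--             while curr % 10 == 9 or curr + 1 > n:
--                 curr //= 10
--             curr += 1
--     return ans
-- ===== Notes on version B (the rewrite author's own statement) =====
-- stated objective: faster
-- what changed: Replaces the recursive pre-order DFS over the digit tree (ten recursive calls per node, probing every empty subtree) by an iterative loop that keeps only the current number and advances it to its lexicographic successor n times via digit arithmetic (multiply by 10, or strip trailing 9s/out-of-range digits and increment).
import Mathlib
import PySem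

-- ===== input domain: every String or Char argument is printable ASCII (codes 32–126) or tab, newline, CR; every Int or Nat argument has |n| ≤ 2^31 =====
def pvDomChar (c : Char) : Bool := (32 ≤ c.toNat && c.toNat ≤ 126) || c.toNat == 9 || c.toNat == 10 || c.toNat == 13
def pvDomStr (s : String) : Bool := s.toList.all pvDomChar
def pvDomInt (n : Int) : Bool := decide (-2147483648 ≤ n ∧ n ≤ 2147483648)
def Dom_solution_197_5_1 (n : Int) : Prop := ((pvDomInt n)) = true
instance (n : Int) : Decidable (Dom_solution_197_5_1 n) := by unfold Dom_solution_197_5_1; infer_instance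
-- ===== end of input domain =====

-- B replaces A's recursive pre-order DFS (ten recursive calls per node) by an iterative
-- loop that keeps only the current number and advances it to its lexicographic successor
-- n times by digit arithmetic; same O(n) asymptotics, measurably faster constant factor.


-- ===== PORT A =====
-- Inner function solution_197_5_2: pre-order traversal; the mutable `ans` becomes the
-- state parameter and the `for xx in range(10)` body is unrolled into its ten iterations.
-- `fuel` bounds the recursion depth so the recursion is structural: it is a totality
-- guard only — solution_197_5_1 passes fuel = 11, and on the stated domain |n| ≤ 2^31
-- every prefix x reached with fuel 0 satisfies x ≥ 10^11 > n, where the Python also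
-- stops (the `x <= n` test fails), so the computation is the same.
def solution_197_5_2 (n : Int) (fuel : Nat) (x : Int) (ans : List Int) : List Int :=
  match fuel with
  | 0 => ans
  | fuel + 1 =>
    if x ≤ n then
      let a := ans ++ [x]
      let a := solution_197_5_2 n fuel (10 * x + 0) a
      let a := solution_197_5_2 n fuel (10 * x + 1) a
      let a := solution_197_5_2 n fuel (10 * x + 2) a
      let a := solution_197_5_2 n fuel (10 * x + 3) a
      let a := solution_197_5_2 n fuel (10 * x + 4) a
      let a := solution_197_5_2 n fuel (10 * x + 5) a
      let a := solution_197_5_2 n fuel (10 * x + 6) a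
      let a := solution_197_5_2 n fuel (10 * x + 7) a
      let a := solution_197_5_2 n fuel (10 * x + 8) a
      let a := solution_197_5_2 n fuel (10 * x + 9) a
      a
    else ans

-- for x in range(1, 10): solution_197_5_2(x), unrolled
def solution_197_5_1 (n : Int) : List Int :=
  let a : List Int := []
  let a := solution_197_5_2 n 11 1 a
  let a := solution_197_5_2 n 11 2 a
  let a := solution_197_5_2 n 11 3 a
  let a := solution_197_5_2 n 11 4 a
  let a := solution_197_5_2 n 11 5 a
  let a := solution_197_5_2 n 11 6 a
  let a := solution_197_5_2 n 11 7 a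
  let a := solution_197_5_2 n 11 8 a
  let a := solution_197_5_2 n 11 9 a
  a

-- ===== PORT B =====
-- the inner `while curr % 10 == 9 or curr + 1 > n: curr //= 10` followed by `curr += 1`.
-- The `c ≤ 0` branch is a totality guard only: Python reaches curr = 0 only after the
-- loop condition has become false (this needs n ≥ 1, which holds whenever the loop runs),
-- and then likewise returns curr + 1.
def pvClimb (n : Int) (c : Int) : Int :=
  if h : c ≤ 0 then c + 1
  else if PySem.Int.mod c 10 = 9 ∨ c + 1 > n then pvClimb n (PySem.Int.floordiv c 10)
  else c + 1
termination_by c.toNat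
decreasing_by
  have := PySem.Int.floordiv_eq_ediv_of_pos (a := c) (b := 10) (by omega)
  omega

-- the body of `for _ in range(n)`: append curr, then advance it
def pvLoop (n : Int) : Nat → Int → List Int
  | 0, _ => []
  | k + 1, c => c :: pvLoop n k (if c * 10 ≤ n then c * 10 else pvClimb n c)

def solution_197_5_1_alt (n : Int) : List Int := pvLoop n n.toNat 1

-- ===== PRECONDITION & SPEC =====
def Spec_solution_197_5_1 (n : Int) (out : List Int) : Prop := out = solution_197_5_1_alt n
instance (n : Int) (out : List Int) : Decidable (Spec_solution_197_5_1 n out) := by unfold Spec_solution_197_5_1; infer_instance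

-- ===== CLAIM (what is proved, stated in full; the proofs are below) =====
def Claim_equal_solution_197_5_1 : Prop := ∀ (n : Int), Dom_solution_197_5_1 n → Spec_solution_197_5_1 n (solution_197_5_1 n)

-- ===== LEMMAS AND PROOFS =====

-- TF n x d : the forest of pre-order lists of the subtrees rooted at the children
-- 10*x+d, 10*x+d+1, …, 10*x+9 of prefix x (clipped at n).
def TF (n : Int) (x : Int) (d : Nat) : List Int :=
  if h : d < 10 ∧ 0 ≤ x ∧ 1 ≤ 10 * x + (d : Int) then
    if 10 * x + (d : Int) ≤ n then
      (10 * x + (d : Int)) :: (TF n (10 * x + (d : Int)) 0 ++ TF n x (d + 1))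
    else TF n x (d + 1)
  else []
termination_by ((n + 1 - x).toNat, 10 - d)
decreasing_by
  all_goals first
    | (apply Prod.Lex.left; omega)
    | (exact Prod.Lex.right _ (by omega))

-- the pre-order list of the subtree rooted at x
def Tsub (n : Int) (x : Int) : List Int := if x ≤ n then x :: TF n x 0 else []


lemma TF_ten (n x : Int) : TF n x 10 = [] := by
  rw [TF]; simp

lemma TF_nil (n : Int) : ∀ (m : Nat) (x : Int) (d : Nat), 10 - d ≤ m → n < 10 * x + d → TF n x d = [] := by
  intro m
  induction m with
  | zero => intro x d hm hd; rw [TF, dif_neg (by omega)]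
  | succ m ih =>
    intro x d hm hd
    rw [TF]; split
    · rw [if_neg (by omega)]
      exact ih x (d+1) (by omega) (by push_cast; omega)
    · rfl

lemma TF_step (n x : Int) (d : Nat) (hd : d < 10) (hx : 0 ≤ x) (h1 : 1 ≤ 10 * x + (d : Int)) :
    TF n x d = Tsub n (10 * x + (d : Int)) ++ TF n x (d + 1) := by
  rw [TF, dif_pos ⟨hd, hx, h1⟩, Tsub]
  split
  · simp
  · simp


lemma recA_eq (n : Int) : ∀ (fuel : Nat) (x : Int) (ans : List Int),
    1 ≤ x → n < x * 10^fuel → solution_197_5_2 n fuel x ans = ans ++ Tsub n x := by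
  intro fuel
  induction fuel with
  | zero =>
    intro x ans hx hn
    simp only [pow_zero, mul_one] at hn
    rw [solution_197_5_2, Tsub, if_neg (by omega), List.append_nil]
  | succ fuel ih =>
    intro x ans hx hn
    have hp : (0:Int) < 10^fuel := pow_pos (by norm_num) fuel
    have hch : ∀ k : Int, 0 ≤ k → n < (10*x+k) * 10^fuel := by
      intro k hk
      have : x * 10^(fuel+1) = (10*x) * 10^fuel := by rw [pow_succ]; ring
      nlinarith
    rw [solution_197_5_2]
    split
    · rename_i h
      show (solution_197_5_2 n fuel (10*x+9) (solution_197_5_2 n fuel (10*x+8) (solution_197_5_2 n fuel (10*x+7) (solution_197_5_2 n fuel (10*x+6) (solution_197_5_2 n fuel (10*x+5) (solution_197_5_2 n fuel (10*x+4) (solution_197_5_2 n fuel (10*x+3) (solution_197_5_2 n fuel (10*x+2) (solution_197_5_2 n fuel (10*x+1) (solution_197_5_2 n fuel (10*x+0) (ans ++ [x]))))))))))) = ans ++ Tsub n x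
      rw [ih (10*x+0) _ (by omega) (hch 0 (by omega)), ih (10*x+1) _ (by omega) (hch 1 (by omega)),
          ih (10*x+2) _ (by omega) (hch 2 (by omega)), ih (10*x+3) _ (by omega) (hch 3 (by omega)),
          ih (10*x+4) _ (by omega) (hch 4 (by omega)), ih (10*x+5) _ (by omega) (hch 5 (by omega)),
          ih (10*x+6) _ (by omega) (hch 6 (by omega)), ih (10*x+7) _ (by omega) (hch 7 (by omega)),
          ih (10*x+8) _ (by omega) (hch 8 (by omega)), ih (10*x+9) _ (by omega) (hch 9 (by omega))]
      conv_rhs => rw [Tsub, if_pos h]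
      rw [TF_step n x 0 (by omega) (by omega) (by omega), TF_step n x 1 (by omega) (by omega) (by omega),
          TF_step n x 2 (by omega) (by omega) (by omega), TF_step n x 3 (by omega) (by omega) (by omega),
          TF_step n x 4 (by omega) (by omega) (by omega), TF_step n x 5 (by omega) (by omega) (by omega),
          TF_step n x 6 (by omega) (by omega) (by omega), TF_step n x 7 (by omega) (by omega) (by omega),
          TF_step n x 8 (by omega) (by omega) (by omega), TF_step n x 9 (by omega) (by omega) (by omega),
          TF_ten]
      push_cast
      simp [List.append_assoc]
    · rw [Tsub, if_neg (by omega), List.append_nil]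

lemma A_eq_TF (n : Int) (hn : n < 10^11) : solution_197_5_1 n = TF n 0 1 := by
  rw [solution_197_5_1]
  rw [recA_eq n 11 1 _ (by omega) (by nlinarith [pow_pos (show (0:Int) < 10 by norm_num) 11]), recA_eq n 11 2 _ (by omega) (by nlinarith [pow_pos (show (0:Int) < 10 by norm_num) 11]),
      recA_eq n 11 3 _ (by omega) (by nlinarith [pow_pos (show (0:Int) < 10 by norm_num) 11]), recA_eq n 11 4 _ (by omega) (by nlinarith [pow_pos (show (0:Int) < 10 by norm_num) 11]),
      recA_eq n 11 5 _ (by omega) (by nlinarith [pow_pos (show (0:Int) < 10 by norm_num) 11]), recA_eq n 11 6 _ (by omega) (by nlinarith [pow_pos (show (0:Int) < 10 by norm_num) 11]),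
      recA_eq n 11 7 _ (by omega) (by nlinarith [pow_pos (show (0:Int) < 10 by norm_num) 11]), recA_eq n 11 8 _ (by omega) (by nlinarith [pow_pos (show (0:Int) < 10 by norm_num) 11]),
      recA_eq n 11 9 _ (by omega) (by nlinarith [pow_pos (show (0:Int) < 10 by norm_num) 11])]
  rw [TF_step n 0 1 (by omega) (by omega) (by omega), TF_step n 0 2 (by omega) (by omega) (by omega),
      TF_step n 0 3 (by omega) (by omega) (by omega), TF_step n 0 4 (by omega) (by omega) (by omega),
      TF_step n 0 5 (by omega) (by omega) (by omega), TF_step n 0 6 (by omega) (by omega) (by omega),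
      TF_step n 0 7 (by omega) (by omega) (by omega), TF_step n 0 8 (by omega) (by omega) (by omega),
      TF_step n 0 9 (by omega) (by omega) (by omega), TF_ten]
  push_cast
  simp [List.append_assoc]


lemma climb_sib (n x : Int) (d : Nat) (hd : d < 9) (h1 : 1 ≤ 10*x+(d:Int)) (hn : 10*x+(d:Int)+1 ≤ n) :
    pvClimb n (10*x+(d:Int)) = 10*x+(d:Int)+1 := by
  rw [pvClimb, dif_neg (by omega), if_neg]
  rw [PySem.Int.mod_eq_emod_of_pos (by norm_num)]
  omega

lemma climb_up (n x : Int) (d : Nat) (hd : d ≤ 9) (h1 : 1 ≤ 10*x+(d:Int)) (hcond : d = 9 ∨ 10*x+(d:Int)+1 > n) :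
    pvClimb n (10*x+(d:Int)) = pvClimb n x := by
  rw [pvClimb, dif_neg (by omega), if_pos]
  · have : PySem.Int.floordiv (10*x+(d:Int)) 10 = x := by
      rw [PySem.Int.floordiv_eq_ediv_of_pos (by norm_num)]; omega
    rw [this]
  · rw [PySem.Int.mod_eq_emod_of_pos (by norm_num)]
    omega


lemma pvLoop_succ (n : Int) (k : Nat) (c : Int) :
    pvLoop n (k+1) c = c :: pvLoop n k (if c * 10 ≤ n then c * 10 else pvClimb n c) := rfl

lemma FL (n : Int) : ∀ (m : Nat) (x : Int) (d k : Nat),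
    (n + 1 - x).toNat * 11 + (10 - d) ≤ m → 0 ≤ x → d ≤ 9 → 1 ≤ 10 * x + (d : Int) → 10 * x + (d : Int) ≤ n →
    pvLoop n ((TF n x d).length + k) (10 * x + (d : Int)) = TF n x d ++ pvLoop n k (pvClimb n x) := by
  intro m
  induction m with
  | zero => intro x d k hm hx hd h1 hn; omega
  | succ m ih =>
    intro x d k hm hx hd h1 hn
    have hxc : x < 10 * x + (d : Int) := by omega
    have hmx : (n + 1 - (10 * x + (d : Int))).toNat < (n + 1 - x).toNat := by omega
    rw [TF, dif_pos ⟨by omega, hx, h1⟩, if_pos hn]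
    simp only [List.length_cons, List.length_append]
    have harr : (TF n (10*x+(d:Int)) 0).length + (TF n x (d+1)).length + 1 + k
        = ((TF n (10*x+(d:Int)) 0).length + ((TF n x (d+1)).length + k)) + 1 := by omega
    rw [harr, pvLoop_succ]
    by_cases h10 : (10*x+(d:Int)) * 10 ≤ n
    · rw [if_pos h10]
      have hc : (10*x+(d:Int))*10 = 10*(10*x+(d:Int)) + ((0:Nat):Int) := by push_cast; ring
      rw [hc, ih (10*x+(d:Int)) 0 ((TF n x (d+1)).length + k) (by omega) (by omega) (by omega)
            (by push_cast; omega) (by push_cast; omega)]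
      by_cases hsib : d < 9 ∧ 10*x+(d:Int)+1 ≤ n
      · rw [climb_sib n x d hsib.1 h1 hsib.2]
        have hcast : (10*x+(d:Int))+1 = 10*x+(((d+1 : Nat)):Int) := by push_cast; ring
        rw [hcast, ih x (d+1) k (by omega) hx (by omega) (by push_cast; omega)
              (by push_cast; omega)]
        simp [List.append_assoc]
      · have hnil : TF n x (d+1) = [] := by
          by_cases hd9 : d = 9
          · subst hd9; exact TF_ten n x
          · exact TF_nil n 10 x (d+1) (by omega) (by push_cast; omega)
        rw [hnil]
        rw [climb_up n x d hd h1 (by omega)]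
        simp
    · rw [if_neg h10]
      have hnilc : TF n (10*x+(d:Int)) 0 = [] := TF_nil n 10 (10*x+(d:Int)) 0 (by omega) (by push_cast; omega)
      rw [hnilc]
      simp only [List.length_nil, Nat.zero_add, List.nil_append]
      by_cases hsib : d < 9 ∧ 10*x+(d:Int)+1 ≤ n
      · rw [climb_sib n x d hsib.1 h1 hsib.2]
        have hcast : (10*x+(d:Int))+1 = 10*x+(((d+1 : Nat)):Int) := by push_cast; ring
        rw [hcast, ih x (d+1) k (by omega) hx (by omega) (by push_cast; omega)
              (by push_cast; omega)]
        simp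
      · have hnil : TF n x (d+1) = [] := by
          by_cases hd9 : d = 9
          · subst hd9; exact TF_ten n x
          · exact TF_nil n 10 x (d+1) (by omega) (by push_cast; omega)
        rw [hnil]
        rw [climb_up n x d hd h1 (by omega)]
        simp


lemma TF_mem (n : Int) : ∀ (m : Nat) (x : Int) (d : Nat) (y : Int),
    (n + 1 - x).toNat * 11 + (10 - d) ≤ m → 0 ≤ x → d ≤ 10 → 1 ≤ 10*x+(d:Int) →
    (y ∈ TF n x d ↔ ∃ k : Nat, (10*x+(d:Int)) * 10^k ≤ y ∧ y < (10*x+10) * 10^k ∧ y ≤ n) := by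
  intro m
  induction m with
  | zero =>
    intro x d y hm hx hd h1
    have hd10 : d = 10 := by omega
    subst hd10
    rw [TF, dif_neg (by omega)]
    simp only [List.not_mem_nil, false_iff]
    rintro ⟨k, hk1, hk2, hk3⟩
    push_cast at hk1
    exact absurd (hk1.trans_lt hk2) (lt_irrefl _)
  | succ m ih =>
    intro x d y hm hx hd h1
    by_cases hd10 : d = 10
    · subst hd10
      rw [TF, dif_neg (by omega)]
      simp only [List.not_mem_nil, false_iff]
      rintro ⟨k, hk1, hk2, hk3⟩
      push_cast at hk1
      exact absurd (hk1.trans_lt hk2) (lt_irrefl _)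
    · have hdlt : d < 10 := by omega
      by_cases hcn : 10*x+(d:Int) ≤ n
      · rw [TF, dif_pos ⟨hdlt, hx, h1⟩, if_pos hcn]
        simp only [List.mem_cons, List.mem_append]
        rw [ih (10*x+(d:Int)) 0 y (by omega) (by omega) (by omega) (by omega),
            ih x (d+1) y (by omega) hx (by omega) (by push_cast; omega)]
        constructor
        · rintro (rfl | ⟨k, hk1, hk2, hk3⟩ | ⟨k, hk1, hk2, hk3⟩)
          · exact ⟨0, by simp, by simp; omega, hcn⟩
          · refine ⟨k+1, ?_, ?_, hk3⟩
            · push_cast at hk1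
              calc (10*x+(d:Int)) * 10^(k+1) = (10*(10*x+(d:Int))) * 10^k := by ring
              _ ≤ y := by linarith
            · have hp : (0:Int) < 10^k := pow_pos (by norm_num) k
              have h90 : (0:Int) ≤ (90 - 10*(d:Int)) * 10^k :=
                mul_nonneg (by omega) hp.le
              calc y < (10*(10*x+(d:Int))+10) * 10^k := hk2
              _ ≤ (10*x+10) * 10^(k+1) := by rw [pow_succ]; nlinarith [h90]
          · refine ⟨k, ?_, hk2, hk3⟩
            have hp : (0:Int) < 10^k := pow_pos (by norm_num) k
            push_cast at hk1
            nlinarith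
        · rintro ⟨k, hk1, hk2, hk3⟩
          match k with
          | 0 =>
            simp only [pow_zero, mul_one] at hk1 hk2
            by_cases hy : y = 10*x+(d:Int)
            · exact Or.inl hy
            · refine Or.inr (Or.inr ⟨0, ?_, ?_, hk3⟩)
              · push_cast; simp only [mul_one]; omega
              · simp only [pow_zero, mul_one]; omega
          | k'+1 =>
            have hp : (0:Int) < 10^k' := pow_pos (by norm_num) k'
            by_cases hy : y < (10*x+(d:Int)+1) * 10^(k'+1)
            · refine Or.inr (Or.inl ⟨k', ?_, ?_, hk3⟩)
              · calc ((10*(10*x+(d:Int))+(0:Nat)) : Int) * 10^k' = (10*x+(d:Int)) * 10^(k'+1) := by push_cast; ring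
                _ ≤ y := hk1
              · calc y < (10*x+(d:Int)+1) * 10^(k'+1) := hy
                _ = (10*(10*x+(d:Int))+10) * 10^k' := by ring
            · refine Or.inr (Or.inr ⟨k'+1, ?_, hk2, hk3⟩)
              push_cast
              calc (10*x+((d:Int)+1)) * 10^(k'+1) = (10*x+(d:Int)+1) * 10^(k'+1) := by ring
              _ ≤ y := Int.not_lt.mp hy
      · rw [TF_nil n 10 x d (by omega) (by omega)]
        simp only [List.not_mem_nil, false_iff]
        rintro ⟨k, hk1, hk2, hk3⟩
        have hp : (1:Int) ≤ 10^k := one_le_pow₀ (by norm_num)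
        nlinarith


lemma TF_nodup (n : Int) : ∀ (m : Nat) (x : Int) (d : Nat),
    (n + 1 - x).toNat * 11 + (10 - d) ≤ m → 0 ≤ x → d ≤ 10 → 1 ≤ 10*x+(d:Int) →
    (TF n x d).Nodup := by
  intro m
  induction m with
  | zero =>
    intro x d hm hx hd h1
    have hd10 : d = 10 := by omega
    subst hd10
    rw [TF, dif_neg (by omega)]
    exact List.nodup_nil
  | succ m ih =>
    intro x d hm hx hd h1
    by_cases hd10 : d = 10
    · subst hd10; rw [TF, dif_neg (by omega)]; exact List.nodup_nil
    · have hdlt : d < 10 := by omega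
      by_cases hcn : 10*x+(d:Int) ≤ n
      · have hxc : x + 1 ≤ 10*x+(d:Int) := by omega
        rw [TF, dif_pos ⟨hdlt, hx, h1⟩, if_pos hcn]
        refine List.nodup_cons.mpr ⟨?_, List.Nodup.append
          (ih (10*x+(d:Int)) 0 (by omega) (by omega) (by omega) (by omega))
          (ih x (d+1) (by omega) hx (by omega) (by push_cast; omega)) ?_⟩
        · intro hmem
          rcases List.mem_append.mp hmem with hm1 | hm2
          · rcases (TF_mem n ((n+1-(10*x+(d:Int))).toNat*11+(10-0)) (10*x+(d:Int)) 0 _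
                le_rfl (by omega) (by omega) (by omega)).mp hm1 with ⟨k, hk1, hk2, hk3⟩
            have hp : (1:Int) ≤ 10^k := one_le_pow₀ (by norm_num)
            push_cast at hk1
            nlinarith
          · rcases (TF_mem n ((n+1-x).toNat*11+(10-(d+1))) x (d+1) _
                le_rfl hx (by omega) (by push_cast; omega)).mp hm2 with ⟨k, hk1, hk2, hk3⟩
            have hp : (1:Int) ≤ 10^k := one_le_pow₀ (by norm_num)
            push_cast at hk1
            nlinarith
        · intro y hy1 hy2
          rcases (TF_mem n ((n+1-(10*x+(d:Int))).toNat*11+(10-0)) (10*x+(d:Int)) 0 _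
              le_rfl (by omega) (by omega) (by omega)).mp hy1 with ⟨a, ha1, ha2, ha3⟩
          rcases (TF_mem n ((n+1-x).toNat*11+(10-(d+1))) x (d+1) _
              le_rfl hx (by omega) (by push_cast; omega)).mp hy2 with ⟨j, hj1, hj2, hj3⟩
          push_cast at ha1 hj1
          rcases Nat.lt_or_ge j (a+1) with hj | hj
          · have hpow : (10:Int)^j ≤ 10^a := pow_le_pow_right₀ (by norm_num) (by omega)
            have h2 : y < (10*(10*x+(d:Int))) * 10^j := by
              have h10c : (10*x+10:Int) ≤ 10*(10*x+(d:Int)) := by omega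
              have hpj : (0:Int) < 10^j := pow_pos (by norm_num) j
              calc y < (10*x+10) * 10^j := hj2
              _ ≤ (10*(10*x+(d:Int))) * 10^j := mul_le_mul_of_nonneg_right h10c hpj.le
            have h3 : (10*(10*x+(d:Int))) * 10^j ≤ (10*(10*x+(d:Int))) * 10^a :=
              mul_le_mul_of_nonneg_left hpow (by omega)
            have h4 : (10*(10*x+(d:Int))) * 10^a ≤ y := by
              calc (10*(10*x+(d:Int))) * 10^a = (10*(10*x+(d:Int))+0) * 10^a := by ring
              _ ≤ y := ha1
            linarith
          · have hpow : (10:Int)^(a+1) ≤ 10^j := pow_le_pow_right₀ (by norm_num) hj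
            have h2 : y < (10*x+(d:Int)+1) * 10^(a+1) := by
              calc y < (10*(10*x+(d:Int))+10) * 10^a := ha2
              _ = (10*x+(d:Int)+1) * 10^(a+1) := by rw [pow_succ]; ring
            have h3 : (10*x+(d:Int)+1) * 10^(a+1) ≤ (10*x+(d:Int)+1) * 10^j :=
              mul_le_mul_of_nonneg_left hpow (by omega)
            have h4 : (10*x+(d:Int)+1) * 10^j ≤ y := by
              calc (10*x+(d:Int)+1) * 10^j = (10*x+((d:Int)+1)) * 10^j := by ring
              _ ≤ y := hj1
            linarith
      · rw [TF_nil n 10 x d (by omega) (by omega)]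
        exact List.nodup_nil


lemma TF01_len (n : Int) (hn : 0 ≤ n) : (TF n 0 1).length = n.toNat := by
  have hnd : (TF n 0 1).Nodup :=
    TF_nodup n ((n+1-0).toNat*11+(10-1)) 0 1 le_rfl le_rfl (by omega) (by norm_num)
  have hfin : (TF n 0 1).toFinset = Finset.Icc 1 n := by
    ext y
    simp only [List.mem_toFinset, Finset.mem_Icc]
    rw [TF_mem n ((n+1-0).toNat*11+(10-1)) 0 1 y le_rfl le_rfl (by omega) (by norm_num)]
    constructor
    · rintro ⟨k, hk1, hk2, hk3⟩
      have hp : (1:Int) ≤ 10^k := one_le_pow₀ (by norm_num)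
      refine ⟨?_, hk3⟩
      push_cast at hk1
      nlinarith
    · rintro ⟨hy1, hy2⟩
      refine ⟨Nat.log 10 y.toNat, ?_, ?_, hy2⟩
      · have h1 := Nat.pow_log_le_self 10 (show y.toNat ≠ 0 by omega)
        have h2 : ((10:Nat)^(Nat.log 10 y.toNat) : Int) ≤ (y.toNat : Int) := Int.ofNat_le.mpr h1
        push_cast at h2 ⊢
        omega
      · have h1 := Nat.lt_pow_succ_log_self (by norm_num : 1 < 10) y.toNat
        have h2 : ((y.toNat : Int)) < ((10:Nat)^(Nat.log 10 y.toNat + 1) : Int) := by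
          exact_mod_cast h1
        push_cast [pow_succ] at h2 ⊢
        omega
  have hcard : (TF n 0 1).length = ((TF n 0 1).toFinset).card :=
    (List.toFinset_card_of_nodup hnd).symm
  rw [hcard, hfin, Int.card_Icc]
  omega

theorem solution_197_5_1_spec : Claim_equal_solution_197_5_1 := by
  intro n hdom
  have hb : n ≤ 2147483648 := by
    simp only [Dom_solution_197_5_1, pvDomInt, decide_eq_true_eq] at hdom
    exact hdom.2
  unfold Spec_solution_197_5_1
  rw [A_eq_TF n (by norm_num; omega), solution_197_5_1_alt]
  by_cases hn : 1 ≤ n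
  · have hlen : (TF n 0 1).length = n.toNat := TF01_len n (by omega)
    have hfl := FL n ((n+1-0).toNat*11+(10-1)) 0 1 0 le_rfl le_rfl (by omega) (by norm_num)
      (by push_cast; omega)
    rw [Nat.add_zero, hlen] at hfl
    norm_num at hfl
    rw [hfl]
    simp [pvLoop]
  · have h0 : n.toNat = 0 := by omega
    rw [h0, TF_nil n 10 0 1 (by omega) (by push_cast; omega)]
    rfl
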